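-- pv_equiv track=rewrite | github.com/buddhimasanthush/medifind_app-SDGP | backend/search/pharmacy_search.py | _find_medicine_in_inventory
-- ===== SOURCE A (Python) =====
-- from typing import Optional
--
-- def _find_medicine_in_inventory(
--     drug_name: str,
--     inventory: list[dict],
-- ) -> Optional[dict]:
--     """
--     Find a medicine in the pharmacy's inventory using fuzzy name matching.
--     Strategy:
--       1. Exact case-insensitive match
--       2. Check if drug_name is contained in medicine_name (or vice versa)
--       3. Match on first word (base drug name)
--     """
--     drug_lower = drug_name.lower().strip()
--     base_name = drug_lower.split()[0] if drug_lower else ""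
--
--     # Strategy 1: Exact match
--     for item in inventory:
--         if item["medicine_name"].lower().strip() == drug_lower:
--             return item
--
--     # Strategy 2: Substring match (either direction)
--     for item in inventory:
--         inv_name = item["medicine_name"].lower().strip()
--         if drug_lower in inv_name or inv_name in drug_lower:
--             return item
--
--     # Strategy 3: First-word match (base drug name)
--     if base_name and len(base_name) > 3:
--         for item in inventory:
--             inv_name = item["medicine_name"].lower().strip()
--             inv_base = inv_name.split()[0] if inv_name else ""
--             if base_name == inv_base:
--                 return item
--
--     return None
-- ===== SOURCE B (Python) =====
-- def _find_medicine_in_inventory(drug_name, inventory):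
--     """Single pass: collect the first candidate of each tier, resolve priority at the end."""
--     drug_lower = drug_name.lower().strip()
--     base_name = drug_lower.split()[0] if drug_lower else ""
--     use_base = bool(base_name) and len(base_name) > 3
--     first_exact = None
--     first_substr = None
--     first_base = None
--     for item in inventory:
--         inv_name = item["medicine_name"].lower().strip()
--         if first_exact is None and inv_name == drug_lower:
--             first_exact = item
--         if first_substr is None and (drug_lower in inv_name or inv_name in drug_lower):
--             first_substr = item
--         if first_base is None and use_base:
--             inv_base = inv_name.split()[0] if inv_name else ""
--             if base_name == inv_base:
--                 first_base = item
--     if first_exact is not None: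
--         return first_exact
--     if first_substr is not None:
--         return first_substr
--     return first_base
-- ===== Notes on version B (the rewrite author's own statement) =====
-- stated objective: simpler
-- what changed: Replaces A's three separate priority-ordered scans over the inventory with a single pass that records the first candidate of each matching tier and resolves the exact > substring > base-name priority after the loop.
-- outside the precondition, e.g. on _find_medicine_in_inventory('a', [{'medicine_name': 'a'}, {}]): A returns {'medicine_name': 'a'}, B raises KeyError
import Mathlib
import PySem

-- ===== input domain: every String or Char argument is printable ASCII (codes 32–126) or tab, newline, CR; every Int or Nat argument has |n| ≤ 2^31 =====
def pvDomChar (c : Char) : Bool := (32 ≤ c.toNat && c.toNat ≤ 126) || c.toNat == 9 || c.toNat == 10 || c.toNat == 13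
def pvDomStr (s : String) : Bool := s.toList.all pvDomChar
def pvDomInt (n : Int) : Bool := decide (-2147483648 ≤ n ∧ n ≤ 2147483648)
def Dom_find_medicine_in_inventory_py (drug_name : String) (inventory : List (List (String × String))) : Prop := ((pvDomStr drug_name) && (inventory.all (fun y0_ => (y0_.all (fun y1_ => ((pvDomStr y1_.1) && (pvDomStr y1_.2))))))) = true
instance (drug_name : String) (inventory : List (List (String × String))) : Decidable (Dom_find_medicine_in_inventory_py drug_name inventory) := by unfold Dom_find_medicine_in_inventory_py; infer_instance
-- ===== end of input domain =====

-- B replaces A's three priority-ordered scans by ONE pass collecting the first candidate of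
-- each tier, resolving priority afterwards (objective: simpler / one traversal).

-- shared helpers (both Pythons compute these values the same way)
-- item["medicine_name"].lower().strip(); under Pre_ the key is always present, so getD "" is exact
def pvName (item : List (String × String)) : String :=
  PySem.Str.strip (PySem.Str.lower (((item.find? (fun p => p.1 == "medicine_name")).map (·.2)).getD ""))

-- s.split()[0] if s else ""  (the [0] is safe: split() of a nonempty stripped string is nonempty)
def pvBase (s : String) : String :=
  if s ≠ "" then PySem.List.pyGetD (PySem.Str.split₀ s) 0 "" else ""

-- ===== PORT A =====
def pvScan1 (dl : String) : List (List (String × String)) → Option (List (String × String))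
  | [] => none
  | item :: rest => if pvName item == dl then some item else pvScan1 dl rest

def pvScan2 (dl : String) : List (List (String × String)) → Option (List (String × String))
  | [] => none
  | item :: rest =>
      let inv_name := pvName item
      if PySem.Str.isIn dl inv_name || PySem.Str.isIn inv_name dl then some item
      else pvScan2 dl rest

def pvScan3 (bn : String) : List (List (String × String)) → Option (List (String × String))
  | [] => none
  | item :: rest =>
      let inv_base := pvBase (pvName item)
      if bn == inv_base then some item else pvScan3 bn rest

def find_medicine_in_inventory_py (drug_name : String) (inventory : List (List (String × String))) : Option (List (String × String)) :=
  let drug_lower := PySem.Str.strip (PySem.Str.lower drug_name)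
  let base_name := pvBase drug_lower
  match pvScan1 drug_lower inventory with
  | some item => some item
  | none =>
    match pvScan2 drug_lower inventory with
    | some item => some item
    | none =>
      if base_name != "" && PySem.Str.len base_name > 3 then
        pvScan3 base_name inventory
      else none

-- ===== PORT B =====
-- one loop step updating the three Optional holders (first_exact, first_substr, first_base)
def pvStepB (dl bn : String) (g : Bool)
    (st : Option (List (String × String)) × Option (List (String × String)) × Option (List (String × String)))
    (item : List (String × String)) :
    Option (List (String × String)) × Option (List (String × String)) × Option (List (String × String)) :=
  let inv_name := pvName item
  let e := if st.1.isNone && (inv_name == dl) then some item else st.1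
  let s := if st.2.1.isNone && (PySem.Str.isIn dl inv_name || PySem.Str.isIn inv_name dl) then some item else st.2.1
  let b := if st.2.2.isNone && g && (bn == pvBase inv_name) then some item else st.2.2
  (e, s, b)

def find_medicine_in_inventory_py_alt (drug_name : String) (inventory : List (List (String × String))) : Option (List (String × String)) :=
  let drug_lower := PySem.Str.strip (PySem.Str.lower drug_name)
  let base_name := pvBase drug_lower
  let use_base := base_name != "" && PySem.Str.len base_name > 3
  let st := inventory.foldl (pvStepB drug_lower base_name use_base) (none, none, none)
  st.1.orElse (fun _ => st.2.1.orElse (fun _ => st.2.2))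

-- ===== PRECONDITION & SPEC =====
-- Pre_ excludes inventories containing an item without a "medicine_name" key: Python A raises
-- KeyError on most of these (though it may return early before reaching the offending item),
-- and B raises KeyError on all of them.
def Pre_find_medicine_in_inventory_py (drug_name : String) (inventory : List (List (String × String))) : Prop :=
  ∀ item ∈ inventory, (item.find? (fun p => p.1 == "medicine_name")).isSome
instance (drug_name : String) (inventory : List (List (String × String))) : Decidable (Pre_find_medicine_in_inventory_py drug_name inventory) := by unfold Pre_find_medicine_in_inventory_py; infer_instance

def pvWitness_find_medicine_in_inventory_py : String × (List (List (String × String))) :=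
  ("Aspirin 100mg", [[("medicine_name", "Paracetamol")], [("medicine_name", "aspirin 100MG "), ("price", "5")]])

def Spec_find_medicine_in_inventory_py (drug_name : String) (inventory : List (List (String × String))) (out : Option (List (String × String))) : Prop := out = find_medicine_in_inventory_py_alt drug_name inventory
instance (drug_name : String) (inventory : List (List (String × String))) (out : Option (List (String × String))) : Decidable (Spec_find_medicine_in_inventory_py drug_name inventory out) := by unfold Spec_find_medicine_in_inventory_py; infer_instance

-- ===== CLAIM (what is proved, stated in full; the proofs are below) =====
def Claim_equal_find_medicine_in_inventory_py : Prop := ∀ (drug_name : String) (inventory : List (List (String × String))), Dom_find_medicine_in_inventory_py drug_name inventory → Pre_find_medicine_in_inventory_py drug_name inventory → Spec_find_medicine_in_inventory_py drug_name inventory (find_medicine_in_inventory_py drug_name inventory)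

-- ===== LEMMAS AND PROOFS =====

-- the fold's three holders are exactly "first not-yet-found match of each tier"
theorem pvFoldB_eq (dl bn : String) (g : Bool) (inv : List (List (String × String))) :
    ∀ e s b, inv.foldl (pvStepB dl bn g) (e, s, b) =
      (e.orElse (fun _ => pvScan1 dl inv),
       s.orElse (fun _ => pvScan2 dl inv),
       b.orElse (fun _ => if g then pvScan3 bn inv else none)) := by
  induction inv with
  | nil =>
    intro e s b
    cases e <;> cases s <;> cases b <;>
      simp [pvScan1, pvScan2, pvScan3]
  | cons item rest ih =>
    intro e s b
    simp only [List.foldl_cons, pvStepB, ih]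
    refine Prod.ext ?_ (Prod.ext ?_ ?_)
    · cases e with
      | some v => simp
      | none =>
        simp only [pvScan1, Option.isNone_none, Bool.true_and, Option.orElse_none]
        split <;> simp [Option.orElse_none]
    · cases s with
      | some v => simp
      | none =>
        simp only [pvScan2, Option.isNone_none, Bool.true_and, Option.orElse_none]
        split <;> simp [Option.orElse_none]
    · cases b with
      | some v => simp
      | none =>
        cases g with
        | false => simp
        | true =>
          simp only [pvScan3, Option.isNone_none, Bool.true_and, Bool.and_true, Bool.true_and,
            Option.orElse_none, if_true]
          split <;> simp [Option.orElse_none]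

theorem pvWitness_ok : Pre_find_medicine_in_inventory_py pvWitness_find_medicine_in_inventory_py.1 pvWitness_find_medicine_in_inventory_py.2 := by
  decide

-- ===== VERDICT (by name: the statement is the Claim_ definition above) =====
theorem find_medicine_in_inventory_py_spec : Claim_equal_find_medicine_in_inventory_py := by
  intro drug_name inventory _hDom _hPre
  unfold Spec_find_medicine_in_inventory_py
  unfold find_medicine_in_inventory_py find_medicine_in_inventory_py_alt
  simp only [pvFoldB_eq, Option.orElse_none]
  cases pvScan1 (PySem.Str.strip (PySem.Str.lower drug_name)) inventory with
  | some item => exact (Option.orElse_some ..).symm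
  | none =>
    simp only [Option.orElse_none]
    cases pvScan2 (PySem.Str.strip (PySem.Str.lower drug_name)) inventory with
    | some item => exact (Option.orElse_some ..).symm
    | none => simp only [Option.orElse_none]
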